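-- pv_equiv track=rewrite | github.com/boypatrick/GUT_routeA | code/audit_boundary_source_action.py | wedge_sign
-- ===== SOURCE A (Python) =====
-- def wedge_sign(unsorted_new: list[int]) -> tuple[tuple[int, ...], int]:
--     if len(set(unsorted_new)) < len(unsorted_new):
--         return tuple(), 0
--     inversions = 0
--     for i in range(len(unsorted_new)):
--         for j in range(i + 1, len(unsorted_new)):
--             if unsorted_new[i] > unsorted_new[j]:
--                 inversions += 1
--     return tuple(sorted(unsorted_new)), -1 if inversions % 2 else 1
-- ===== SOURCE B (Python) =====
-- def wedge_sign(unsorted_new: list[int]) -> tuple[tuple[int, ...], int]: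
--     # One combined insertion-sort pass: sorts, counts inversion parity, and
--     # detects duplicates on the fly (no set(), no nested index loops, no sorted()).
--     acc = []          # strictly increasing list of the elements seen so far
--     parity = 0
--     for x in unsorted_new:
--         i = 0
--         while i < len(acc) and acc[i] < x:
--             i += 1
--         if i < len(acc) and acc[i] == x:
--             return (), 0          # duplicate element
--         parity ^= (len(acc) - i) % 2   # elements already seen that are > x
--         acc.insert(i, x)
--     return tuple(acc), -1 if parity else 1
-- ===== Notes on version B (the rewrite author's own statement) =====
-- stated objective: alternative
-- what changed: Replaced set-based duplicate check + O(n^2) nested index loops + library sort by a single insertion-sort pass that simultaneously builds the sorted list, accumulates inversion parity from each insertion position, and stops at the first duplicate.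
import Mathlib
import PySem

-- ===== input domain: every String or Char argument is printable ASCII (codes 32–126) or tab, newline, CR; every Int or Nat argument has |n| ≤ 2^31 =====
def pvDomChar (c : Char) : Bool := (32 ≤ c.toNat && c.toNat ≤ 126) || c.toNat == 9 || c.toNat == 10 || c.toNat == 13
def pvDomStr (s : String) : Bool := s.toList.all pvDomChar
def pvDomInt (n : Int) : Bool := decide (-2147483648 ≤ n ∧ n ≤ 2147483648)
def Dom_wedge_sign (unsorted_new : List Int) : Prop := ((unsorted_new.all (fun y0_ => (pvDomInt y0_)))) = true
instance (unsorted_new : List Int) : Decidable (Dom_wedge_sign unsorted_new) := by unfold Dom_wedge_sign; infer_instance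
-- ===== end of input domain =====

-- B replaces A's set-based duplicate check, nested index loops and library sort by a single
-- insertion-sort pass (alternative structure, same worst-case cost; return values proved equal).

-- ===== PORT A =====
def wedge_sign (unsorted_new : List Int) : List Int × Int :=
  if (PySem.Set.ofList unsorted_new).length < unsorted_new.length then ([], 0)
  else
    let n : Int := unsorted_new.length
    let inversions : Int :=
      (PySem.List.pyRange 0 n 1).foldl (fun inv i =>
        (PySem.List.pyRange (i + 1) n 1).foldl (fun inv j =>
          if PySem.List.pyGetD unsorted_new i 0 > PySem.List.pyGetD unsorted_new j 0
          then inv + 1 else inv) inv) 0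
    (PySem.List.sorted unsorted_new (fun x => x) false,
     if inversions % 2 ≠ 0 then -1 else 1)

-- ===== PORT B =====
-- insert x into the strictly increasing list, returning the new list and the number of
-- elements passed over that are greater than x; none = x already present (duplicate)
def insCount (x : Int) : List Int → Option (List Int × Nat)
  | [] => some ([x], 0)
  | y :: ys =>
    if x < y then some (x :: y :: ys, ys.length + 1)
    else if x = y then none
    else (insCount x ys).map (fun p => (y :: p.1, p.2))

def wedge_sign_alt (unsorted_new : List Int) : List Int × Int :=
  match unsorted_new.foldl
      (fun st x => match st with
        | none => none
        | some (acc, parity) =>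
          (insCount x acc).map (fun p => (p.1, parity ^^^ (p.2 % 2))))
      (some (([] : List Int), (0 : Nat))) with
  | none => ([], 0)
  | some (acc, parity) => (acc, if parity ≠ 0 then -1 else 1)

-- ===== PRECONDITION & SPEC =====
def Spec_wedge_sign (unsorted_new : List Int) (out : List Int × Int) : Prop := out = wedge_sign_alt unsorted_new
instance (unsorted_new : List Int) (out : List Int × Int) : Decidable (Spec_wedge_sign unsorted_new out) := by unfold Spec_wedge_sign; infer_instance

-- ===== CLAIM (what is proved, stated in full; the proofs are below) =====
def Claim_equal_wedge_sign : Prop := ∀ (unsorted_new : List Int), Dom_wedge_sign unsorted_new → Spec_wedge_sign unsorted_new (wedge_sign unsorted_new)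

-- ===== LEMMAS AND PROOFS =====

-- number of inversions, by structural recursion ("later elements smaller than the head")
def inv : List Int → Nat
  | [] => 0
  | y :: ys => ys.countP (fun z => decide (z < y)) + inv ys

theorem inv_append_singleton (xs : List Int) (x : Int) :
    inv (xs ++ [x]) = inv xs + xs.countP (fun y => decide (x < y)) := by
  induction xs with
  | nil => simp [inv]
  | cons y ys ih =>
    simp [inv, ih, List.countP_append, List.countP_cons]
    omega

-- len(set(u)) < len(u) is exactly "u has a duplicate"
theorem ofList_length_le (u : List Int) :
    (PySem.Set.ofList u).length ≤ u.length ∧ ((PySem.Set.ofList u).length = u.length ↔ u.Nodup) := by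
  induction u using List.reverseRecOn with
  | nil => simp [PySem.Set.ofList]
  | append_singleton xs x ih =>
    obtain ⟨ih1, ih2⟩ := ih
    rw [PySem.Set.ofList_append_singleton, PySem.Set.add_eq_ite]
    by_cases h : x ∈ PySem.Set.ofList xs
    · rw [PySem.Set.mem_ofList] at h
      simp [h]
      refine ⟨by omega, by intro he; exfalso; omega, ?_⟩
      intro hn; exact absurd h (by simp [List.nodup_append] at hn; tauto)
    · rw [PySem.Set.mem_ofList] at h
      simp [h, List.nodup_append]
      constructor
      · omega
      · constructor
        · intro he; exact ⟨ih2.mp (by omega), fun a ha heq => h (heq ▸ ha)⟩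
        · intro hn; have := ih2.mpr hn.1; omega

theorem ofList_length_lt_iff (u : List Int) :
    ((PySem.Set.ofList u).length < u.length ↔ ¬ u.Nodup) := by
  obtain ⟨h1, h2⟩ := ofList_length_le u
  constructor
  · intro hlt hn; have := h2.mpr hn; omega
  · intro hn
    rcases Nat.lt_or_ge (PySem.Set.ofList u).length u.length with h | h
    · exact h
    · exact absurd (h2.mp (by omega)) hn

theorem insCount_of_mem (x : Int) (s : List Int) (hs : s.Pairwise (· < ·)) (h : x ∈ s) :
    insCount x s = none := by
  induction s with
  | nil => simp at h
  | cons y ys ih =>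
    rcases List.mem_cons.mp h with rfl | hm
    · simp [insCount]
    · have hy : y < x := (List.pairwise_cons.mp hs).1 x hm
      have h1 : ¬ x < y := by omega
      have h2 : ¬ x = y := by omega
      simp [insCount, h1, h2, ih (List.pairwise_cons.mp hs).2 hm]

theorem insCount_of_not_mem (x : Int) (s : List Int) (hs : s.Pairwise (· < ·)) (h : x ∉ s) :
    ∃ l, insCount x s = some (l, s.countP (fun y => decide (x < y))) ∧
      l.Perm (x :: s) ∧ l.Pairwise (· < ·) := by
  induction s with
  | nil => exact ⟨[x], by simp [insCount], List.Perm.refl _, by simp⟩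
  | cons y ys ih =>
    obtain ⟨hy, hys⟩ := List.pairwise_cons.mp hs
    by_cases h1 : x < y
    · refine ⟨x :: y :: ys, ?_, List.Perm.refl _, ?_⟩
      · have : ys.countP (fun z => decide (x < z)) = ys.length :=
          List.countP_eq_length.mpr (fun z hz => by simp; have := hy z hz; omega)
        simp [insCount, h1, this]
      · exact List.pairwise_cons.mpr ⟨fun z hz => by
          rcases List.mem_cons.mp hz with rfl | hm
          · exact h1
          · have := hy z hm; omega, hs⟩
    · have h2 : ¬ x = y := fun he => h (he ▸ List.mem_cons_self)
      obtain ⟨l', he', hp', hpw'⟩ := ih hys (fun hm => h (List.mem_cons_of_mem _ hm))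
      refine ⟨y :: l', ?_, ?_, ?_⟩
      · simp [insCount, h1, h2, he']
      · exact (hp'.cons y).trans (List.Perm.swap x y ys)
      · refine List.pairwise_cons.mpr ⟨fun z hz => ?_, hpw'⟩
        rcases List.mem_cons.mp (hp'.mem_iff.mp hz) with rfl | h3
        · omega
        · exact hy z h3

theorem xor_mod_two (a b : Nat) : (a % 2) ^^^ (b % 2) = (a + b) % 2 := by
  rcases Nat.mod_two_eq_zero_or_one a with h1 | h1 <;>
    rcases Nat.mod_two_eq_zero_or_one b with h2 | h2 <;> simp [h1, h2] <;> omega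

-- B's fold: none exactly on duplicates, otherwise the sorted prefix with the inversion parity
theorem wedge_main (u : List Int) :
    (¬ u.Nodup → (u.foldl
      (fun st x => match st with
        | none => none
        | some (acc, parity) =>
          (insCount x acc).map (fun p => (p.1, parity ^^^ (p.2 % 2))))
      (some (([] : List Int), (0 : Nat))) = none)) ∧
    (u.Nodup → ∃ l, (u.foldl
      (fun st x => match st with
        | none => none
        | some (acc, parity) =>
          (insCount x acc).map (fun p => (p.1, parity ^^^ (p.2 % 2))))
      (some (([] : List Int), (0 : Nat))) = some (l, inv u % 2)) ∧
      l.Perm u ∧ l.Pairwise (· < ·)) := by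
  induction u using List.reverseRecOn with
  | nil => exact ⟨fun h => absurd List.nodup_nil h, fun _ => ⟨[], by simp [inv], by simp, by simp⟩⟩
  | append_singleton xs x ih =>
    obtain ⟨ih1, ih2⟩ := ih
    rw [List.foldl_append]
    by_cases hn : xs.Nodup
    · obtain ⟨l, he, hp, hpw⟩ := ih2 hn
      by_cases hx : x ∈ xs
      · have hnl : x ∈ l := hp.mem_iff.mpr hx
        constructor
        · intro _; simp [List.foldl, he, insCount_of_mem x l hpw hnl]
        · intro hnd
          exact absurd hx (by simp [List.nodup_append] at hnd; intro hm; exact hnd.2 x hm rfl)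
      · have hxl : x ∉ l := fun hm => hx (hp.mem_iff.mp hm)
        obtain ⟨l', he', hp', hpw'⟩ := insCount_of_not_mem x l hpw hxl
        constructor
        · intro hnd
          exfalso
          apply hnd
          simp [List.nodup_append, hn]
          intro a ha he2; exact hx (he2 ▸ ha)
        · intro _
          refine ⟨l', ?_, ?_, hpw'⟩
          · simp only [List.foldl, he, he', Option.map_some]
            have hc : l.countP (fun y => decide (x < y)) = xs.countP (fun y => decide (x < y)) :=
              hp.countP_eq _
            rw [hc, xor_mod_two, ← inv_append_singleton]
          · exact (hp'.trans ((hp.cons x).trans (List.Perm.refl _))).trans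
              (by simpa using (List.perm_append_singleton x xs).symm)
    · constructor
      · intro _; simp [List.foldl, ih1 hn]
      · intro hnd
        exact absurd (hnd.sublist (List.sublist_append_left _ _)) hn

-- A's nested index loops compute inv u
theorem sum_drop (u : List Int) :
    ((List.range u.length).map
      (fun k => ((u.drop (k+1)).countP (fun z => decide (z < u.getD k 0)) : Int))).sum
      = (inv u : Int) := by
  induction u with
  | nil => simp [inv]
  | cons y ys ih =>
    rw [List.length_cons, List.range_succ_eq_map]
    simp only [List.map_cons, List.map_map, List.sum_cons]
    have h2 : ((List.range ys.length).map
        ((fun k => (((y::ys).drop (k+1)).countP (fun z => decide (z < (y::ys).getD k 0)) : Int)) ∘ Nat.succ)).sum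
        = ((List.range ys.length).map
        (fun k => ((ys.drop (k+1)).countP (fun z => decide (z < ys.getD k 0)) : Int))).sum := by
      apply congrArg
      apply List.map_congr_left
      intro k hk
      simp [Function.comp]
    simp only [h2, ih]
    simp [inv]

theorem foldl_if_count (u : List Int) (c : Int) : ∀ (acc : Int),
    u.foldl (fun a y => if c > y then a + 1 else a) acc
      = acc + u.countP (fun y => decide (y < c)) := by
  induction u with
  | nil => simp
  | cons y ys ih =>
    intro acc
    by_cases h : c > y
    · simp [List.foldl_cons, h, ih]
      omega
    · simp [List.foldl_cons, h, ih]

theorem a_inversions (u : List Int) :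
    (PySem.List.pyRange 0 (u.length : Int) 1).foldl (fun inv i =>
        (PySem.List.pyRange (i + 1) (u.length : Int) 1).foldl (fun inv j =>
          if PySem.List.pyGetD u i 0 > PySem.List.pyGetD u j 0
          then inv + 1 else inv) inv) (0 : Int) = (inv u : Int) := by
  have hcong : (PySem.List.pyRange 0 (u.length : Int) 1).foldl (fun inv i =>
        (PySem.List.pyRange (i + 1) (u.length : Int) 1).foldl (fun inv j =>
          if PySem.List.pyGetD u i 0 > PySem.List.pyGetD u j 0
          then inv + 1 else inv) inv) (0 : Int)
      = (PySem.List.pyRange 0 (u.length : Int) 1).foldl (fun inv i =>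
          inv + ((u.drop (i.toNat + 1)).countP (fun z => decide (z < u.getD i.toNat 0)) : Int)) 0 := by
    apply PySem.List.foldl_congr_mem
    intro acc i hi
    have hib := (PySem.List.mem_pyRange_one).mp hi
    have hgi : PySem.List.pyGetD u i 0 = u.getD i.toNat 0 := by
      rw [PySem.List.pyGetD_eq_getElem u 0 hib.1 (by exact_mod_cast hib.2)]
      exact (List.getD_eq_getElem u 0 _).symm
    rw [PySem.List.foldl_pyRange_pyGetD' u 0
      (fun a y => if PySem.List.pyGetD u i 0 > y then a + 1 else a) acc (show (0:Int) ≤ i + 1 by omega)]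
    rw [foldl_if_count, hgi]
    have : (i + 1).toNat = i.toNat + 1 := by omega
    rw [this]
  rw [hcong, PySem.List.foldl_add, PySem.List.pyRange_one]
  simp only [List.map_map, zero_add]
  have hm : List.map
      ((fun i : Int => ((List.countP (fun z => decide (z < u.getD i.toNat 0)) (List.drop (i.toNat + 1) u) : Nat) : Int)) ∘ fun k : Nat => (k : Int))
      (List.range (((u.length : Int) - 0)).toNat)
      = List.map (fun k : Nat => ((List.countP (fun z => decide (z < u.getD k 0)) (List.drop (k + 1) u) : Nat) : Int)) (List.range u.length) := by
    have h0 : (((u.length : Int) - 0)).toNat = u.length := by omega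
    rw [h0]
    apply List.map_congr_left
    intro k hk
    rfl
  rw [hm, sum_drop]

-- ===== VERDICT (by name: the statement is the Claim_ definition above) =====
theorem wedge_sign_spec : Claim_equal_wedge_sign := by
  intro u _
  unfold Spec_wedge_sign wedge_sign wedge_sign_alt
  obtain ⟨main1, main2⟩ := wedge_main u
  by_cases hdup : (PySem.Set.ofList u).length < u.length
  · have hnn : ¬ u.Nodup := (ofList_length_lt_iff u).mp hdup
    rw [if_pos hdup, main1 hnn]
  · have hnd : u.Nodup := not_not.mp (fun h => hdup ((ofList_length_lt_iff u).mpr h))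
    obtain ⟨l, he, hp, hpw⟩ := main2 hnd
    rw [if_neg hdup, he]
    simp only [a_inversions u]
    have hsorted : PySem.List.sorted u (fun x => x) false = l :=
      PySem.List.sorted_eq_of_perm_of_pairwise_lt u l (fun x => x) hp hpw
    have hsign : (((inv u : Int)) % 2 ≠ 0) ↔ ((inv u % 2 : Nat) ≠ 0) := by omega
    by_cases hpar : (inv u % 2 : Nat) ≠ 0
    · simp [hsorted, hpar, hsign.mpr hpar]
    · have : ((inv u : Int)) % 2 = 0 := by omega
      simp [hsorted, this, not_not.mp hpar]
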